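-- pv_equiv track=rewrite | github.com/kserm/Advent_of_Code | 2024/day_12/solution.py | is_in_group
-- ===== SOURCE A (Python) =====
-- def is_in_group(positions: list[list], y, x: int) -> int:
--     index = -1
--     for i in range(len(positions)):
--         position_list = positions[i]
--         for position in position_list:
--             a, b = position
--             if ((abs(a-y)==1) and ((b-x)==0)) or (((a-y)==0) and (abs(b-x)==1)):
--                 index = i
--                 break
--     return index
-- ===== SOURCE B (Python) =====
-- def is_in_group(positions: list[list], y, x: int) -> int:
--     pos_to_group = {}
--     for i, group in enumerate(positions):
--         for a, b in group:
--             pos_to_group[(a, b)] = i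
--     best = -1
--     for c in ((y - 1, x), (y + 1, x), (y, x - 1), (y, x + 1)):
--         g = pos_to_group.get(c, -1)
--         if g > best:
--             best = g
--     return best
-- ===== Notes on version B (the rewrite author's own statement) =====
-- stated objective: alternative
-- what changed: Instead of testing the neighbor condition arithmetically for every position of every group, B builds a position-to-group index once (later groups overwrite) and then probes only the four orthogonal neighbor cells of (y,x), taking the maximum group index found (default -1).
import Mathlib
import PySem

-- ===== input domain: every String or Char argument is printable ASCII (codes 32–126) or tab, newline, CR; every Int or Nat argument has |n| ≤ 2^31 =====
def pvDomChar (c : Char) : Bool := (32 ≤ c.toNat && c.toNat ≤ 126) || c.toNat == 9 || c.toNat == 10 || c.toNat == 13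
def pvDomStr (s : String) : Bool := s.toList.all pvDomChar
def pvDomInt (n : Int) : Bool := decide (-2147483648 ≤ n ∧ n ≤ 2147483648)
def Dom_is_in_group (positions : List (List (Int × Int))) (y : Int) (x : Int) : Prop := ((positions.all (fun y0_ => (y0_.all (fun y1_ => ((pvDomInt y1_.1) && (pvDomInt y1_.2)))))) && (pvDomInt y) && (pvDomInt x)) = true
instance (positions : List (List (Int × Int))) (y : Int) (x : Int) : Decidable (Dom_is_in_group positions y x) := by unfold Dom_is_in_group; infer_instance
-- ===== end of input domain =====

-- B replaces the per-position arithmetic neighbor test with a position→group index probed at the four neighbor cells (alternative data structure, same cost).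


-- ===== PORT A =====
-- inner 'for position in position_list: … break': returns whether the break fired
def pvScanA (y x : Int) : List (Int × Int) → Bool
  | [] => false
  | (a, b) :: rest =>
      -- abs(a-y)==1 is transliterated as (a-y).natAbs = 1 (exact for Int)
      if (((a - y).natAbs = 1) ∧ b - x = 0) ∨ ((a - y = 0) ∧ ((b - x).natAbs = 1)) then true
      else pvScanA y x rest

def is_in_group (positions : List (List (Int × Int))) (y : Int) (x : Int) : Int :=
  (PySem.List.pyRange 0 positions.length 1).foldl
    (fun index i =>
      let position_list := PySem.List.pyGetD positions i []
      if pvScanA y x position_list then i else index)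
    (-1)

-- ===== PORT B =====
def pvBuild (positions : List (List (Int × Int))) : PySem.Dict (Int × Int) Int :=
  (PySem.List.enumerate positions 0).foldl
    (fun d p => p.2.foldl (fun d' ab => d'.insert ab p.1) d)
    PySem.Dict.empty

def is_in_group_alt (positions : List (List (Int × Int))) (y : Int) (x : Int) : Int :=
  let pos_to_group := pvBuild positions
  [(y - 1, x), (y + 1, x), (y, x - 1), (y, x + 1)].foldl
    (fun best c =>
      let g := pos_to_group.getD c (-1)
      if best < g then g else best)
    (-1)

-- ===== PRECONDITION & SPEC =====
def Spec_is_in_group (positions : List (List (Int × Int))) (y : Int) (x : Int) (out : Int) : Prop := out = is_in_group_alt positions y x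
instance (positions : List (List (Int × Int))) (y : Int) (x : Int) (out : Int) : Decidable (Spec_is_in_group positions y x out) := by unfold Spec_is_in_group; infer_instance

-- ===== CLAIM (what is proved, stated in full; the proofs are below) =====
def Claim_equal_is_in_group : Prop := ∀ (positions : List (List (Int × Int))) (y : Int) (x : Int), Dom_is_in_group positions y x → Spec_is_in_group positions y x (is_in_group positions y x)

-- ===== LEMMAS AND PROOFS =====

-- the four orthogonal neighbor cells of (y,x)
def pvNbrs (y x : Int) : List (Int × Int) := [(y - 1, x), (y + 1, x), (y, x - 1), (y, x + 1)]

-- the probe step and probe of a dict at the four neighbor cells (B's second loop)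
def pvProbe (y x : Int) (d : PySem.Dict (Int × Int) Int) : Int :=
  (pvNbrs y x).foldl (fun best c => let g := d.getD c (-1); if best < g then g else best) (-1)

-- inserting one group: what happens to a lookup
def pvInsGroup (d : PySem.Dict (Int × Int) Int) (g : List (Int × Int)) (i : Int) :
    PySem.Dict (Int × Int) Int :=
  g.foldl (fun d' ab => d'.insert ab i) d

theorem getD_insGroup (d : PySem.Dict (Int × Int) Int) (g : List (Int × Int)) (i : Int)
    (c : Int × Int) :
    (pvInsGroup d g i).getD c (-1) = if c ∈ g then i else d.getD c (-1) := by
  induction g generalizing d with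
  | nil => simp [pvInsGroup]
  | cons hd tl ih =>
      simp only [pvInsGroup, List.foldl_cons, List.mem_cons]
      rw [show (tl.foldl (fun d' ab => d'.insert ab i) (d.insert hd i)) =
            pvInsGroup (d.insert hd i) tl i from rfl, ih]
      by_cases hc : c ∈ tl
      · simp [hc]
      · simp [hc, PySem.Dict.getD_insert]

theorem scanA_iff (y x : Int) (g : List (Int × Int)) :
    pvScanA y x g = true ↔ ∃ c ∈ pvNbrs y x, c ∈ g := by
  induction g with
  | nil => simp [pvScanA, pvNbrs]
  | cons hd tl ih =>
      obtain ⟨a, b⟩ := hd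
      simp only [pvScanA]
      split_ifs with h
      · simp only [true_iff]
        refine ⟨(a, b), ?_, List.mem_cons_self⟩
        simp only [pvNbrs, List.mem_cons, List.not_mem_nil, or_false, Prod.mk.injEq]
        omega
      · rw [ih]
        constructor
        · rintro ⟨c, hc, hm⟩; exact ⟨c, hc, List.mem_cons_of_mem _ hm⟩
        · rintro ⟨c, hc, hm⟩
          rcases List.mem_cons.mp hm with h1 | h2
          · exfalso; apply h
            revert hc
            simp only [h1, pvNbrs, List.mem_cons, List.not_mem_nil, or_false, Prod.mk.injEq]
            omega
          · exact ⟨c, hc, h2⟩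

-- probe is the max of the four looked-up values and -1
theorem probe_eq_max (y x : Int) (d : PySem.Dict (Int × Int) Int) :
    pvProbe y x d =
      max (max (max (max (-1) (d.getD (y - 1, x) (-1))) (d.getD (y + 1, x) (-1)))
        (d.getD (y, x - 1) (-1))) (d.getD (y, x + 1) (-1)) := by
  simp only [pvProbe, pvNbrs, List.foldl_cons, List.foldl_nil]
  generalize d.getD (y - 1, x) (-1) = u1
  generalize d.getD (y + 1, x) (-1) = u2
  generalize d.getD (y, x - 1) (-1) = u3
  generalize d.getD (y, x + 1) (-1) = u4
  simp only [max_def]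
  split_ifs <;> omega

-- the common fold over the enumerated groups (A's outer loop in enumerate form)
def pvAFold (y x : Int) (l : List (Int × List (Int × Int))) (acc : Int) : Int :=
  l.foldl (fun index p => if pvScanA y x p.2 then p.1 else index) acc

theorem main_invariant (y x : Int) (gs : List (List (Int × Int))) (k : Int)
    (d : PySem.Dict (Int × Int) Int) (hk : 0 ≤ k)
    (hlt : ∀ c, d.getD c (-1) < k) :
    pvProbe y x ((PySem.List.enumerate gs k).foldl (fun d p => pvInsGroup d p.2 p.1) d)
      = pvAFold y x (PySem.List.enumerate gs k) (pvProbe y x d) := by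
  induction gs generalizing k d with
  | nil => simp [PySem.List.enumerate_nil, pvAFold]
  | cons g tl ih =>
      rw [PySem.List.enumerate_cons]
      simp only [List.foldl_cons, pvAFold]
      have hlt' : ∀ c, (pvInsGroup d g k).getD c (-1) < k + 1 := by
        intro c
        rw [getD_insGroup]
        split
        · omega
        · have := hlt c; omega
      have hstep : pvProbe y x (pvInsGroup d g k)
          = if pvScanA y x g then k else pvProbe y x d := by
        by_cases hs : pvScanA y x g = true
        · rw [if_pos hs]
          obtain ⟨c, hcn, hcg⟩ := (scanA_iff y x g).mp hs
          have hub : ∀ c', (pvInsGroup d g k).getD c' (-1) ≤ k := by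
            intro c'
            rw [getD_insGroup]
            split
            · omega
            · have := hlt c'; omega
          have hwit : (pvInsGroup d g k).getD c (-1) = k := by
            rw [getD_insGroup, if_pos hcg]
          rw [probe_eq_max]
          have h1 := hub (y - 1, x)
          have h2 := hub (y + 1, x)
          have h3 := hub (y, x - 1)
          have h4 := hub (y, x + 1)
          have hc4 : c = (y - 1, x) ∨ c = (y + 1, x) ∨ c = (y, x - 1) ∨ c = (y, x + 1) := by
            simpa [pvNbrs] using hcn
          rcases hc4 with rfl | rfl | rfl | rfl <;>
            simp only [max_def] <;> split_ifs <;> omega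
        · rw [if_neg hs]
          have hnone : ∀ c ∈ pvNbrs y x, c ∉ g := by
            intro c hc hm
            exact hs ((scanA_iff y x g).mpr ⟨c, hc, hm⟩)
          rw [probe_eq_max, probe_eq_max]
          have e : ∀ c ∈ pvNbrs y x, (pvInsGroup d g k).getD c (-1) = d.getD c (-1) := by
            intro c hc
            rw [getD_insGroup, if_neg (hnone c hc)]
          rw [e _ (by simp [pvNbrs]), e _ (by simp [pvNbrs]), e _ (by simp [pvNbrs]),
            e _ (by simp [pvNbrs])]
      rw [ih (k + 1) (pvInsGroup d g k) (by omega) hlt', hstep, pvAFold]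

theorem probe_empty (y x : Int) : pvProbe y x PySem.Dict.empty = -1 := by
  rw [probe_eq_max]; simp [PySem.Dict.getD_empty]

theorem isA_eq_fold (positions : List (List (Int × Int))) (y x : Int) :
    is_in_group positions y x = pvAFold y x (PySem.List.enumerate positions 0) (-1) := by
  unfold is_in_group pvAFold
  rw [PySem.List.enumerate_eq_map_pyRange positions ([] : List (Int × Int)), List.foldl_map]
  simp [PySem.List.len]

-- ===== VERDICT (by name: the statement is the Claim_ definition above) =====
theorem is_in_group_spec : Claim_equal_is_in_group := by
  intro positions y x _
  unfold Spec_is_in_group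
  rw [isA_eq_fold]
  show pvAFold y x (PySem.List.enumerate positions 0) (-1) = is_in_group_alt positions y x
  have h := main_invariant y x positions 0 PySem.Dict.empty le_rfl
    (by intro c; simp [PySem.Dict.getD_empty])
  rw [probe_empty] at h
  rw [← h]
  rfl
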